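-- pv_equiv track=rewrite | github.com/trevineju/quedenormas | scripts_de_tratamento_de_texto/salva_decretos.py | organiza_cortes
-- ===== SOURCE A (Python) =====
-- desloc_padrao = 450
--
-- def get_ultima_ocorrencia_antes(ref, lista):
--     aux = [0]
--     for i in range(len(lista)):
--         if lista[i] < ref:
--             aux.append(lista[i])
--     return aux[-1]
--
-- def get_primeira_ocorrencia_depois(ref, lista):
--     for i in range(len(lista)):
--         if ref < lista[i]:
--             return lista[i]
--
-- def organiza_cortes(i_normas, i_inicios, i_fins):
--     cortes = []
--
--     for i in range(len(i_normas)):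
--         inicio = get_ultima_ocorrencia_antes(i_normas[i], i_inicios)
--         fim = get_primeira_ocorrencia_depois(i_normas[i], i_fins)
--         fim += desloc_padrao
--         cortes.append((inicio, fim))
--
--     return cortes
-- ===== SOURCE B (Python) =====
-- desloc_padrao = 450
--
-- def organiza_cortes(i_normas, i_inicios, i_fins):
--     # Precompute two strictly monotone candidate stacks once, so each query
--     # scans only the (typically short) stack instead of the whole list.
--     mins = []                       # suffix minima of i_inicios, right-to-left (strictly decreasing)
--     for x in reversed(i_inicios):
--         if not mins or x < mins[-1]:
--             mins.append(x)
--     maxs = []                       # prefix maxima of i_fins, left-to-right (strictly increasing)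
--     for x in i_fins:
--         if not maxs or x > maxs[-1]:
--             maxs.append(x)
--     return [(next((m for m in mins if m < ref), 0),
--              next(m for m in maxs if ref < m) + desloc_padrao)
--             for ref in i_normas]
-- ===== Notes on version B (the rewrite author's own statement) =====
-- stated objective: alternative
-- what changed: B precomputes two strictly monotone candidate stacks once (suffix minima of i_inicios scanned right-to-left, prefix maxima of i_fins), then answers each norma query by an early-exit first-match scan over the short stack instead of rebuilding an aux list / scanning the full offset lists per query.
import Mathlib
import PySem

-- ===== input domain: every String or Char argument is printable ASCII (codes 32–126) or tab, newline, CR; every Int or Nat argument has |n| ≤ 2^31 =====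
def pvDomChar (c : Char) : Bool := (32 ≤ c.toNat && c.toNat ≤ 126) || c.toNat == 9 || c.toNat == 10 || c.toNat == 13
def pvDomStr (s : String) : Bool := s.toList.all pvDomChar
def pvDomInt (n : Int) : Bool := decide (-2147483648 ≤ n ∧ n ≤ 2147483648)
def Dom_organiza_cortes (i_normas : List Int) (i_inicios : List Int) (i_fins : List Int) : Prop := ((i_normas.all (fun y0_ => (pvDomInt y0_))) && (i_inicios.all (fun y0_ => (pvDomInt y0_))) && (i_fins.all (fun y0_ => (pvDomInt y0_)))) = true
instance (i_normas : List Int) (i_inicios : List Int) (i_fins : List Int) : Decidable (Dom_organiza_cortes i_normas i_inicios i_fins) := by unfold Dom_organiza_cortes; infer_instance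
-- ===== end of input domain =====

-- B precomputes monotone candidate stacks (suffix minima / prefix maxima) once, so each
-- query scans only the stack with early exit instead of the whole offset list (alternative
-- algorithm; equality of RETURN values is proved, neither version mutates its arguments).

-- ===== PORT A =====
-- aux = [0]; for i in range(len(lista)): if lista[i] < ref: aux.append(lista[i]); return aux[-1]
def gua (ref : Int) (lista : List Int) : Int :=
  -- aux starts as [0], so aux[-1] always exists: the .getD 0 on pyGet? is exact
  (PySem.List.pyGet?
    ((PySem.List.pyRange 0 (lista.length : Int) 1).foldl
      (fun acc j => if PySem.List.pyGetD lista j 0 < ref then acc ++ [PySem.List.pyGetD lista j 0] else acc) [0])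
    (-1)).getD 0

-- for i in range(len(lista)): if ref < lista[i]: return lista[i]   (falls through → None)
def gpo (ref : Int) : List Int → Option Int
  | [] => none
  | x :: xs => if ref < x then some x else gpo ref xs

def organiza_cortes (i_normas : List Int) (i_inicios : List Int) (i_fins : List Int) : List (Int × Int) :=
  i_normas.foldl
    (fun cortes ref =>
      cortes ++ [(gua ref i_inicios,
        -- fim += 450; fim = None raises TypeError in Python: excluded by Pre_, 0 is a totalization default
        match gpo ref i_fins with
        | some f => f + 450
        | none => 0)])
    []

-- ===== PORT B =====
-- 'if not st or cmp(x, st[-1]): st.append(x)' — one step of the monotone-stack build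
def pvStep (c : Int → Int → Bool) (acc : List Int) (x : Int) : List Int :=
  match acc.getLast? with
  | none => [x]
  | some m => if c x m then acc ++ [x] else acc

def pvStack (c : Int → Int → Bool) (l : List Int) : List Int := l.foldl (pvStep c) []

def organiza_cortes_alt (i_normas : List Int) (i_inicios : List Int) (i_fins : List Int) : List (Int × Int) :=
  let mins := pvStack (fun a b => a < b) i_inicios.reverse   -- suffix minima, scanning reversed(i_inicios)
  let maxs := pvStack (fun a b => b < a) i_fins              -- prefix maxima of i_fins
  i_normas.map (fun ref =>
    ((mins.find? (fun m => m < ref)).getD 0,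
     -- Source B raises StopIteration when no prefix maximum exceeds ref: excluded by Pre_, 0 is a totalization default
     match maxs.find? (fun m => ref < m) with
     | some f => f + 450
     | none => 0))

-- ===== PRECONDITION & SPEC =====
-- Pre_ excludes exactly the inputs where some norma position has no end offset strictly
-- after it: there Python A raises TypeError (None + 450) and Source B raises StopIteration.
def Pre_organiza_cortes (i_normas : List Int) (i_inicios : List Int) (i_fins : List Int) : Prop :=
  ∀ r ∈ i_normas, ∃ x ∈ i_fins, r < x
instance (i_normas : List Int) (i_inicios : List Int) (i_fins : List Int) : Decidable (Pre_organiza_cortes i_normas i_inicios i_fins) := by unfold Pre_organiza_cortes; infer_instance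

def pvWitness_organiza_cortes : List Int × List Int × List Int := ([3, 10], [1, 7], [5, 12])

def Spec_organiza_cortes (i_normas : List Int) (i_inicios : List Int) (i_fins : List Int) (out : List (Int × Int)) : Prop := out = organiza_cortes_alt i_normas i_inicios i_fins
instance (i_normas : List Int) (i_inicios : List Int) (i_fins : List Int) (out : List (Int × Int)) : Decidable (Spec_organiza_cortes i_normas i_inicios i_fins out) := by unfold Spec_organiza_cortes; infer_instance

-- ===== CLAIM (what is proved, stated in full; the proofs are below) =====
def Claim_equal_organiza_cortes : Prop := ∀ (i_normas : List Int) (i_inicios : List Int) (i_fins : List Int), Dom_organiza_cortes i_normas i_inicios i_fins → Pre_organiza_cortes i_normas i_inicios i_fins → Spec_organiza_cortes i_normas i_inicios i_fins (organiza_cortes i_normas i_inicios i_fins)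

-- ===== LEMMAS AND PROOFS =====

-- the monotone stack as a structural recursion (proof vehicle for pvStack)
def mstack (c : Int → Int → Bool) : List Int → List Int
  | [] => []
  | x :: xs => x :: mstack c (xs.filter (fun y => c y x))
termination_by l => l.length
decreasing_by
  simpa using Nat.lt_succ_of_le (List.length_filter_le _ xs)

theorem foldl_pvStep_eq (c : Int → Int → Bool)
    (hc : ∀ a b d : Int, c a b = true → c b d = true → c a d = true) :
    ∀ (l acc : List Int) (m : Int), acc.getLast? = some m →
      l.foldl (pvStep c) acc = acc ++ mstack c (l.filter (fun y => c y m)) := by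
  intro l
  induction l with
  | nil => intro acc m _; simp [mstack]
  | cons x xs ih =>
    intro acc m hm
    by_cases hx : c x m = true
    · have hstep : pvStep c acc x = acc ++ [x] := by simp [pvStep, hm, hx]
      have hlast : (acc ++ [x]).getLast? = some x := by simp
      have := ih (acc ++ [x]) x hlast
      simp only [List.foldl_cons, hstep, this]
      have hfil : (x :: xs).filter (fun y => c y m) = x :: xs.filter (fun y => c y m) := by
        simp [List.filter, hx]
      rw [hfil, mstack, List.filter_filter]
      have : (fun y => c y x && c y m) = (fun y => c y x) := by
        funext y
        by_cases hy : c y x = true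
        · simp [hy, hc y x m hy hx]
        · simp [hy]
      rw [this, List.append_assoc]
      rfl
    · have hstep : pvStep c acc x = acc := by simp [pvStep, hm, hx]
      have := ih acc m hm
      have hfil : (x :: xs).filter (fun y => c y m) = xs.filter (fun y => c y m) := by
        simp [List.filter, hx]
      simp only [List.foldl_cons, hstep, this, hfil]

theorem pvStack_eq_mstack (c : Int → Int → Bool)
    (hc : ∀ a b d : Int, c a b = true → c b d = true → c a d = true)
    (l : List Int) : pvStack c l = mstack c l := by
  cases l with
  | nil => simp [pvStack, mstack]
  | cons x xs =>
    have hstep : pvStep c [] x = [x] := by simp [pvStep]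
    have hlast : ([x] : List Int).getLast? = some x := by simp
    calc pvStack c (x :: xs) = xs.foldl (pvStep c) [x] := by
          simp [pvStack, hstep]
      _ = [x] ++ mstack c (xs.filter (fun y => c y x)) := foldl_pvStep_eq c hc xs [x] x hlast
      _ = mstack c (x :: xs) := by rw [mstack]; rfl

theorem find?_filter_of (p q : Int → Bool) (h : ∀ y, p y = true → q y = true) :
    ∀ l : List Int, (l.filter q).find? p = l.find? p := by
  intro l
  induction l with
  | nil => rfl
  | cons x xs ih =>
    by_cases hq : q x = true
    · by_cases hp : p x = true
      · simp [List.filter, hq, List.find?, hp]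
      · simp [List.filter, hq, List.find?, hp, ih]
    · have hp : p x = false := by
        cases hpx : p x
        · rfl
        · exact absurd (h x hpx) (by simp [hq])
      simp [List.filter, hq, List.find?, hp, ih]

theorem find?_mstack (c : Int → Int → Bool)
    (hlink : ∀ a b r : Int, c a b = false → c a r = true → c b r = true) (r : Int) :
    ∀ (n : Nat) (l : List Int), l.length ≤ n →
      (mstack c l).find? (fun y => c y r) = l.find? (fun y => c y r) := by
  intro n
  induction n with
  | zero =>
    intro l h
    have : l = [] := List.eq_nil_of_length_eq_zero (Nat.le_zero.mp h)
    subst this; simp [mstack]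
  | succ n ih =>
    intro l h
    cases l with
    | nil => simp [mstack]
    | cons x xs =>
      rw [mstack]
      by_cases hx : c x r = true
      · simp [List.find?, hx]
      · have hlen : (xs.filter (fun y => c y x)).length ≤ n :=
          le_trans (List.length_filter_le _ xs) (Nat.succ_le_succ_iff.mp h)
        have h1 := ih (xs.filter (fun y => c y x)) hlen
        have h2 : (xs.filter (fun y => c y x)).find? (fun y => c y r) = xs.find? (fun y => c y r) := by
          refine find?_filter_of _ _ (fun y hy => ?_) xs
          cases hyx : c y x
          · exact absurd (hlink y x r hyx hy) (by simp [hx])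
          · rfl
        simp [List.find?, hx, h1, h2]

-- A's last-occurrence-before scan, characterised as a first match over the reversed list
theorem getLast?_filter_eq_find?_reverse (p : Int → Bool) (l : List Int) :
    (l.filter p).getLast? = l.reverse.find? p := by
  induction l with
  | nil => rfl
  | cons x xs ih =>
    rw [List.reverse_cons, List.find?_append, ← ih]
    by_cases hp : p x = true
    · rw [List.filter_cons_of_pos hp]
      cases h : xs.filter p with
      | nil => simp [List.find?, hp]
      | cons a t => simp [List.getLast?_cons]
    · have hp' : p x = false := by cases hpx : p x; rfl; exact absurd hpx hp
      rw [List.filter_cons_of_neg (by simp [hp'])]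
      cases h : (xs.filter p).getLast? <;> simp [List.find?, hp']

theorem gua_eq (ref : Int) (l : List Int) :
    gua ref l = (l.reverse.find? (fun y => y < ref)).getD 0 := by
  unfold gua
  rw [PySem.List.foldl_pyRange_zero_pyGetD' l 0
      (fun acc v => if v < ref then acc ++ [v] else acc) [0]]
  rw [PySem.List.foldl_append_ite_eq_filter]
  rw [PySem.List.pyGet?_neg_one]
  rw [← getLast?_filter_eq_find?_reverse]
  cases l.filter (fun y => decide (y < ref)) with
  | nil => simp
  | cons a t => simp [List.getLast?_cons]

theorem gpo_eq (ref : Int) (l : List Int) : gpo ref l = l.find? (fun y => ref < y) := by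
  induction l with
  | nil => rfl
  | cons x xs ih =>
    by_cases hx : ref < x
    · simp [gpo, hx, List.find?]
    · simp [gpo, hx, List.find?, ih]

theorem mins_find (ref : Int) (l : List Int) :
    (pvStack (fun a b => a < b) l.reverse).find? (fun m => m < ref)
      = l.reverse.find? (fun m => m < ref) := by
  rw [pvStack_eq_mstack]
  · exact find?_mstack (fun a b => decide (a < b))
      (fun a b r h1 h2 => decide_eq_true
        (by have := of_decide_eq_false h1; have := of_decide_eq_true h2; omega))
      ref l.reverse.length l.reverse le_rfl
  · intro a b d h1 h2; exact decide_eq_true (by have := of_decide_eq_true h1; have := of_decide_eq_true h2; omega)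

theorem maxs_find (ref : Int) (l : List Int) :
    (pvStack (fun a b => b < a) l).find? (fun m => ref < m)
      = l.find? (fun m => ref < m) := by
  rw [pvStack_eq_mstack]
  · exact find?_mstack (fun a b => decide (b < a))
      (fun a b r h1 h2 => decide_eq_true
        (by have := of_decide_eq_false h1; have := of_decide_eq_true h2; omega))
      ref l.length l le_rfl
  · intro a b d h1 h2; exact decide_eq_true (by have := of_decide_eq_true h1; have := of_decide_eq_true h2; omega)

-- ===== VERDICT (by name: the statement is the Claim_ definition above) =====
theorem organiza_cortes_spec : Claim_equal_organiza_cortes := by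
  intro i_normas i_inicios i_fins _ _
  unfold Spec_organiza_cortes organiza_cortes organiza_cortes_alt
  rw [PySem.List.foldl_append_singleton_eq_map]
  simp only [List.nil_append]
  apply List.map_congr_left
  intro ref _
  rw [Prod.mk.injEq]
  exact ⟨by rw [gua_eq, mins_find], by rw [gpo_eq, maxs_find]⟩
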